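-- pv_equiv track=rewrite | github.com/georgia-tech-synergy-lab/SparseAccelerator-RTL | mx_accelerator/python/compute/test_vegeta_compute_top.py | create_input_demand_matrix_ws
-- ===== SOURCE A (Python) =====
-- def create_input_demand_matrix_ws(input_matrix):
--     input_demand_matrix = []
--
--     for i in range(len(input_matrix) + len(input_matrix[0]) - 1):
--         cycle_input = []
--         for j in range(len(input_matrix[0])):
--             offset_index = i - j
--             if offset_index >= 0 and offset_index < len(input_matrix):
--                 cycle_input.append(input_matrix[offset_index][j])
--             else:
--                 cycle_input.append(0)
--         input_demand_matrix.append(cycle_input)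
--     return input_demand_matrix
-- ===== SOURCE B (Python) =====
-- def create_input_demand_matrix_ws(input_matrix):
--     R = len(input_matrix)
--     C = len(input_matrix[0])
--     out = [[0] * C for _ in range(R + C - 1)]
--     for r in range(R):
--         row = input_matrix[r]
--         for c in range(C):
--             out[r + c][c] = row[c]
--     return out
-- ===== Notes on version B (the rewrite author's own statement) =====
-- stated objective: faster
-- what changed: B pre-allocates the (R+C-1)xC zero matrix and scatters each input element input[r][c] to out[r+c][c] in one pass over the input, instead of A's per-output-cell gather with a bounds test on every cell.
import Mathlib
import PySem

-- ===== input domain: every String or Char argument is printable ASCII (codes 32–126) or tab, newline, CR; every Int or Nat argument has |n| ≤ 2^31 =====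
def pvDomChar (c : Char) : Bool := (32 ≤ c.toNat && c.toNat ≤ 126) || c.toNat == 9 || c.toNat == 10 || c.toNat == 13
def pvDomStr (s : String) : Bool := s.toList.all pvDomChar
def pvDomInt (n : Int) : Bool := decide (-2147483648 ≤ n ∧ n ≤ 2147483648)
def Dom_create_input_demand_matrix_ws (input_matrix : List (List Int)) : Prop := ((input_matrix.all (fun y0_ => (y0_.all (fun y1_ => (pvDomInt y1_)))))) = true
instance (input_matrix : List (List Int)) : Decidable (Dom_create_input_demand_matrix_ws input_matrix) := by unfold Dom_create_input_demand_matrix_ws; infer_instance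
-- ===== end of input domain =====

-- B is an alternative decomposition: it allocates the zero output and scatters each input
-- element to out[r+c][c] in one pass over the input, instead of A's gather over output cells.

-- ===== PORT A =====
def create_input_demand_matrix_ws (input_matrix : List (List Int)) : List (List Int) :=
  -- for i in range(len(input_matrix) + len(input_matrix[0]) - 1):
  (PySem.List.pyRange 0 ((input_matrix.length : Int) +
      (((PySem.List.pyGet? input_matrix 0).getD []).length : Int) - 1) 1).foldl
    (fun input_demand_matrix i =>
      -- for j in range(len(input_matrix[0])): build cycle_input
      let cycle_input :=
        (PySem.List.pyRange 0 (((PySem.List.pyGet? input_matrix 0).getD []).length : Int) 1).foldl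
          (fun cycle_input j =>
            -- offset_index = i - j
            if 0 ≤ i - j ∧ i - j < (input_matrix.length : Int) then
              cycle_input ++
                [(PySem.List.pyGet? ((PySem.List.pyGet? input_matrix (i - j)).getD []) j).getD 0]
            else
              cycle_input ++ [0])
          []
      input_demand_matrix ++ [cycle_input])
    []

-- ===== PORT B =====
-- out[r+c][c] = row[c]  (indices always in range under Pre_; List.set is exact there)
def pvScatterRow (out : List (List Int)) (r : Nat) (row : List Int) (C : Nat) : List (List Int) :=
  (List.range C).foldl
    (fun out c => out.set (r + c) ((out.getD (r + c) []).set c (row.getD c 0))) out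

def create_input_demand_matrix_ws_alt (input_matrix : List (List Int)) : List (List Int) :=
  let R := input_matrix.length
  let C := ((PySem.List.pyGet? input_matrix 0).getD []).length
  let out0 := List.replicate (R + C - 1) (List.replicate C (0 : Int))
  (List.range R).foldl
    (fun out r => pvScatterRow out r (input_matrix.getD r []) C) out0

-- ===== PRECONDITION & SPEC =====
-- Pre_ excludes exactly the inputs where the Python A raises IndexError: the empty matrix
-- (input_matrix[0]) and matrices with a row shorter than the first row (B raises there too).
def Pre_create_input_demand_matrix_ws (input_matrix : List (List Int)) : Prop :=
  input_matrix ≠ [] ∧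
  ∀ row ∈ input_matrix, ((PySem.List.pyGet? input_matrix 0).getD []).length ≤ row.length
instance (input_matrix : List (List Int)) : Decidable (Pre_create_input_demand_matrix_ws input_matrix) := by unfold Pre_create_input_demand_matrix_ws; infer_instance

def pvWitness_create_input_demand_matrix_ws : List (List Int) := [[1, 2], [3, 4]]

def Spec_create_input_demand_matrix_ws (input_matrix : List (List Int)) (out : List (List Int)) : Prop := out = create_input_demand_matrix_ws_alt input_matrix
instance (input_matrix : List (List Int)) (out : List (List Int)) : Decidable (Spec_create_input_demand_matrix_ws input_matrix out) := by unfold Spec_create_input_demand_matrix_ws; infer_instance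

-- ===== CLAIM (what is proved, stated in full; the proofs are below) =====
def Claim_equal_create_input_demand_matrix_ws : Prop := ∀ (input_matrix : List (List Int)), Dom_create_input_demand_matrix_ws input_matrix → Pre_create_input_demand_matrix_ws input_matrix → Spec_create_input_demand_matrix_ws input_matrix (create_input_demand_matrix_ws input_matrix)


-- ===== LEMMAS AND PROOFS =====

-- the canonical 'gather' matrix both ports equal: entry (i, j) is m[i-j][j] when in range, else 0
def pvM (N C : Nat) (f : Nat → Nat → Int) : List (List Int) :=
  (List.range N).map (fun i => (List.range C).map (f i))

def pvG (m : List (List Int)) (r : Nat) (i j : Nat) : Int :=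
  if j ≤ i ∧ i - j < r then (m.getD (i - j) []).getD j 0 else 0

theorem pvM_congr {N C : Nat} {f f' : Nat → Nat → Int}
    (h : ∀ i < N, ∀ j < C, f i j = f' i j) : pvM N C f = pvM N C f' := by
  unfold pvM
  apply List.map_congr_left
  intro i hi
  apply List.map_congr_left
  intro j hj
  exact h i (List.mem_range.mp hi) j (List.mem_range.mp hj)

theorem pvM_getD {N C : Nat} {f : Nat → Nat → Int} {p : Nat} (hp : p < N) :
    (pvM N C f).getD p [] = (List.range C).map (f p) := by
  simp [pvM, List.getD, hp]

theorem pvM_set {N C : Nat} {f : Nat → Nat → Int} {p q : Nat} {v : Int}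
    (hp : p < N) (_hq : q < C) :
    (pvM N C f).set p (((pvM N C f).getD p []).set q v) =
      pvM N C (fun i j => if i = p ∧ j = q then v else f i j) := by
  rw [pvM_getD hp]
  apply List.ext_getElem
  · simp [pvM]
  · intro i hi hi'
    have hiN : i < N := by simpa [pvM] using hi'
    simp only [pvM, List.getElem_set, List.getElem_map, List.getElem_range]
    by_cases hip : p = i
    · subst hip
      rw [if_pos rfl]
      apply List.ext_getElem
      · simp
      · intro j hj hj'
        simp only [List.getElem_set, List.getElem_map, List.getElem_range]
        by_cases hjq : q = j
        · subst hjq; simp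
        · rw [if_neg hjq, if_neg (fun hcon => hjq hcon.2.symm)]
    · rw [if_neg hip]
      apply List.map_congr_left
      intro j _
      have : ¬ (i = p ∧ j = q) := by omega
      rw [if_neg this]

theorem pvScatterRow_aux (N C : Nat) (f : Nat → Nat → Int) (r : Nat) (row : List Int)
    (c : Nat) (hc : c ≤ C) (h : ∀ c' < C, r + c' < N) :
    (List.range c).foldl
      (fun out c' => out.set (r + c') ((out.getD (r + c') []).set c' (row.getD c' 0)))
      (pvM N C f) =
    pvM N C (fun i j => if i = r + j ∧ j < c then row.getD j 0 else f i j) := by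
  induction c with
  | zero => simp
  | succ c ih =>
    rw [List.range_succ, List.foldl_append, ih (by omega), List.foldl_cons, List.foldl_nil,
      pvM_set (h c (by omega)) (by omega)]
    apply pvM_congr
    intro i hi j hj
    by_cases h1 : i = r + j
    · subst h1
      by_cases h2 : j = c
      · subst h2; simp
      · have hne : ¬ (r + j = r + c ∧ j = c) := by omega
        rw [if_neg hne]
        split_ifs <;> (first | rfl | omega)
    · have hne : ¬ (i = r + c ∧ j = c) := by omega
      have hne2 : ¬ (i = r + j ∧ j < c) := by omega
      have hne3 : ¬ (i = r + j ∧ j < c + 1) := by omega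
      rw [if_neg hne, if_neg hne2, if_neg hne3]

theorem pvScatterRow_eq (N C : Nat) (f : Nat → Nat → Int) (r : Nat) (row : List Int)
    (h : ∀ c' < C, r + c' < N) :
    pvScatterRow (pvM N C f) r row C =
      pvM N C (fun i j => if i = r + j then row.getD j 0 else f i j) := by
  unfold pvScatterRow
  rw [pvScatterRow_aux N C f r row C le_rfl h]
  exact pvM_congr (fun i _ j hj => by simp [hj])

theorem pvB_aux (m : List (List Int)) (C : Nat) (r : Nat) : r ≤ m.length →
    (List.range r).foldl
      (fun out r' => pvScatterRow out r' (m.getD r' []) C)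
      (pvM (m.length + C - 1) C (pvG m 0)) =
    pvM (m.length + C - 1) C (pvG m r) := by
  induction r with
  | zero => intro _; rfl
  | succ r ih =>
    intro hr
    rw [List.range_succ, List.foldl_append, ih (by omega), List.foldl_cons, List.foldl_nil,
      pvScatterRow_eq (m.length + C - 1) C (pvG m r) r (m.getD r [])
        (by intro c' hc'; omega)]
    apply pvM_congr
    intro i hi j hj
    unfold pvG
    by_cases h1 : i = r + j
    · subst h1
      have hjj : r + j - j = r := by omega
      rw [if_pos rfl, if_pos (by omega), hjj]
    · rw [if_neg h1]
      by_cases h2 : j ≤ i ∧ i - j < r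
      · rw [if_pos h2, if_pos (by omega)]
      · rw [if_neg h2, if_neg (by omega)]

theorem pvB_eq (m : List (List Int)) :
    create_input_demand_matrix_ws_alt m =
      pvM (m.length + ((PySem.List.pyGet? m 0).getD []).length - 1)
        ((PySem.List.pyGet? m 0).getD []).length
        (pvG m m.length) := by
  have halt : create_input_demand_matrix_ws_alt m =
      (List.range m.length).foldl
        (fun out r => pvScatterRow out r (m.getD r []) ((PySem.List.pyGet? m 0).getD []).length)
        (List.replicate (m.length + ((PySem.List.pyGet? m 0).getD []).length - 1)
          (List.replicate ((PySem.List.pyGet? m 0).getD []).length (0 : Int))) := rfl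
  rw [halt]
  have h0 : List.replicate (m.length + ((PySem.List.pyGet? m 0).getD []).length - 1)
        (List.replicate ((PySem.List.pyGet? m 0).getD []).length (0 : Int)) =
      pvM (m.length + ((PySem.List.pyGet? m 0).getD []).length - 1)
        ((PySem.List.pyGet? m 0).getD []).length (pvG m 0) := by
    apply List.ext_getElem
    · simp [pvM]
    · intro i hi hi'
      simp only [pvM, List.getElem_map, List.getElem_range, List.getElem_replicate]
      apply List.ext_getElem
      · simp
      · intro j hj hj'
        simp [pvG]
  rw [h0, pvB_aux m _ m.length le_rfl]

theorem pvA_cell (m : List (List Int)) (k j : Nat) :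
    (if 0 ≤ (k : Int) - (j : Int) ∧ (k : Int) - (j : Int) < (m.length : Int) then
        (PySem.List.pyGet? ((PySem.List.pyGet? m ((k : Int) - (j : Int))).getD []) (j : Int)).getD 0
      else 0) = pvG m m.length k j := by
  unfold pvG
  by_cases hjk : j ≤ k
  · have hcast : (k : Int) - (j : Int) = ((k - j : Nat) : Int) := by omega
    rw [hcast]
    by_cases hlt : k - j < m.length
    · rw [if_pos (by constructor <;> omega), if_pos ⟨hjk, hlt⟩]
      simp [PySem.List.pyGet?_natCast, List.getD]
    · rw [if_neg (by omega), if_neg (by omega)]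
  · rw [if_neg (by omega), if_neg (by omega)]

theorem pvA_row (m : List (List Int)) (k : Nat) :
    (PySem.List.pyRange 0 (((PySem.List.pyGet? m 0).getD []).length : Int) 1).foldl
      (fun cycle_input j =>
        if 0 ≤ (k : Int) - j ∧ (k : Int) - j < (m.length : Int) then
          cycle_input ++
            [(PySem.List.pyGet? ((PySem.List.pyGet? m ((k : Int) - j)).getD []) j).getD 0]
        else cycle_input ++ [0]) [] =
    (List.range ((PySem.List.pyGet? m 0).getD []).length).map (pvG m m.length k) := by
  have hbody : (fun (cycle_input : List Int) (j : Int) =>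
      if 0 ≤ (k : Int) - j ∧ (k : Int) - j < (m.length : Int) then
        cycle_input ++
          [(PySem.List.pyGet? ((PySem.List.pyGet? m ((k : Int) - j)).getD []) j).getD 0]
      else cycle_input ++ [0]) =
      fun (cycle_input : List Int) (j : Int) => cycle_input ++
        [if 0 ≤ (k : Int) - j ∧ (k : Int) - j < (m.length : Int) then
          (PySem.List.pyGet? ((PySem.List.pyGet? m ((k : Int) - j)).getD []) j).getD 0 else 0] := by
    funext cyc j
    split_ifs <;> rfl
  rw [hbody, PySem.List.foldl_append_singleton_eq_map, List.nil_append,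
    PySem.List.pyRange_one, List.map_map]
  have hC : ((((PySem.List.pyGet? m 0).getD []).length : Int) - 0).toNat
      = ((PySem.List.pyGet? m 0).getD []).length := by omega
  rw [hC]
  apply List.map_congr_left
  intro j _
  simp only [Function.comp_apply, zero_add]
  exact pvA_cell m k j

theorem pvA_eq (m : List (List Int)) :
    create_input_demand_matrix_ws m =
      pvM (m.length + ((PySem.List.pyGet? m 0).getD []).length - 1)
        ((PySem.List.pyGet? m 0).getD []).length
        (pvG m m.length) := by
  unfold create_input_demand_matrix_ws
  rw [PySem.List.foldl_append_singleton_eq_map, List.nil_append]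
  have hr : PySem.List.pyRange 0 ((m.length : Int) +
      (((PySem.List.pyGet? m 0).getD []).length : Int) - 1) 1 =
      (List.range (m.length + ((PySem.List.pyGet? m 0).getD []).length - 1)).map
        (fun k => Int.ofNat k) := by
    rw [PySem.List.pyRange_one]
    have : (((m.length : Int) + (((PySem.List.pyGet? m 0).getD []).length : Int) - 1) - 0).toNat
        = m.length + ((PySem.List.pyGet? m 0).getD []).length - 1 := by omega
    rw [this]
    exact List.map_congr_left (fun x _ => by simp)
  rw [hr, List.map_map]
  unfold pvM
  apply List.map_congr_left
  intro k _
  simp only [Function.comp_apply]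
  exact pvA_row m k

-- ===== VERDICT (by name: the statement is the Claim_ definition above) =====
theorem create_input_demand_matrix_ws_spec : Claim_equal_create_input_demand_matrix_ws := by
  intro m _ _
  unfold Spec_create_input_demand_matrix_ws
  rw [pvA_eq, pvB_eq]
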